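-- pv_equiv track=rewrite | github.com/noachilles/TIL_2025 | 04_algorithm_basic/03-stack-queue/100_offline/쇠막대기_자르기/sol.py | cut_sticks
-- ===== SOURCE A (Python) =====
-- from collections import deque
--
-- def cut_sticks(chars):
--     # 전체 스틱 개수
--     total = 0
--     # 현재 레이저에 의해 잘리는 막대 개수
--     nums = 0
--     # 이전값, 현재값
--     pre = ''
--     now = ''
--     queue = deque(chars)
--     # queue에 값이 있으면
--     while queue:
--         # now에 popleft
--         now = queue.popleft()
--         # 여는 괄호이면 현재 쇠막대 개수 + 1
--         if now == '(':
--             nums += 1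
--         # 닫는 괄호이면 현재 쇠막대 개수 - 1 (레이저여도, 쇠막대여도 -1 해야함)
--         elif now == ')':
--             nums -= 1
--             # 만약 여는 괄호와 연속하면 - 레이저이면: 현재 레이저 아래에 있는 쇠막대 개수만큼 절단되어 total에 추가
--             if pre == '(':
--                 total += nums
--             # 만약 여는 괄호와 연속하지 않으면 - 막대가 하나 끝난 것이므로: total에 1 추가
--             else:
--                 total += 1
--         pre = now
--     return total
-- ===== SOURCE B (Python) =====
-- def cut_sticks(chars):
--     s = list(chars)
--     n = len(s)
--     total = 0
--     depth = 0
--     i = 0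
--     while i < n:
--         c = s[i]
--         if c == '(' and i + 1 < n and s[i + 1] == ')':
--             # laser: cuts every currently open stick
--             total += depth
--             i += 2
--         elif c == '(':
--             depth += 1
--             i += 1
--         elif c == ')':
--             # stick end
--             total += 1
--             depth -= 1
--             i += 1
--         else:
--             i += 1
--     return total
-- ===== Notes on version B (the rewrite author's own statement) =====
-- stated objective: alternative
-- what changed: B replaces A's deque-with-previous-character scan by an index scan with one-token lookahead that consumes a laser pair '(' ')' in a single two-step move, keeping only an open-depth counter and no 'pre' state.
import Mathlib
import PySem

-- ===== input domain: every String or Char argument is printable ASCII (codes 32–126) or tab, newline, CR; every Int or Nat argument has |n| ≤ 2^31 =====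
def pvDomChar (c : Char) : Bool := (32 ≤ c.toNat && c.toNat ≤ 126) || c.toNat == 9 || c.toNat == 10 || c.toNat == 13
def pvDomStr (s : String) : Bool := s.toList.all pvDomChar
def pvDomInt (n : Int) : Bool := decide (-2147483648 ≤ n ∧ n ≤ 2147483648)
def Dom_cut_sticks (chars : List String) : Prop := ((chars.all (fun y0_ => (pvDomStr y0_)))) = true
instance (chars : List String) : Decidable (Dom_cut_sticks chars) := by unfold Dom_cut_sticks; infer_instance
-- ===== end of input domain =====

-- B changes the decomposition: index scan with one-token lookahead consuming a laser pair in one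
-- step (no deque, no previous-token state); same O(n) cost, no speed claim.

-- ===== PORT A =====
-- A's while-loop over the deque, state (total, nums, pre), one element consumed per step.
def cutSticksLoopA : List String → Int → Int → String → Int
  | [], total, _, _ => total
  | now :: rest, total, nums, pre =>
    if now = "(" then
      cutSticksLoopA rest total (nums + 1) now
    else if now = ")" then
      cutSticksLoopA rest (if pre = "(" then total + (nums - 1) else total + 1) (nums - 1) now
    else
      cutSticksLoopA rest total nums now

def cut_sticks (chars : List String) : Int :=
  cutSticksLoopA chars 0 0 ""

-- ===== PORT B =====
-- B's index loop over the materialized list: the suffix from index i, lookahead at "(",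
-- a laser pair consumed in one two-element step; state (total, depth).
def cutSticksLoopB : List String → Int → Int → Int
  | [], total, _ => total
  | c :: rest, total, depth =>
    if c = "(" ∧ rest.head? = some ")" then
      cutSticksLoopB rest.tail (total + depth) depth
    else if c = "(" then
      cutSticksLoopB rest total (depth + 1)
    else if c = ")" then
      cutSticksLoopB rest (total + 1) (depth - 1)
    else
      cutSticksLoopB rest total depth
  termination_by l _ _ => l.length
  decreasing_by all_goals simp [List.length_tail]

def cut_sticks_alt (chars : List String) : Int :=
  cutSticksLoopB chars 0 0

-- ===== PRECONDITION & SPEC =====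
def Spec_cut_sticks (chars : List String) (out : Int) : Prop := out = cut_sticks_alt chars
instance (chars : List String) (out : Int) : Decidable (Spec_cut_sticks chars out) := by unfold Spec_cut_sticks; infer_instance

-- ===== CLAIM (what is proved, stated in full; the proofs are below) =====
def Claim_equal_cut_sticks : Prop := ∀ (chars : List String), Dom_cut_sticks chars → Spec_cut_sticks chars (cut_sticks chars)

-- ===== LEMMAS AND PROOFS =====

theorem loopA_cons (c : String) (rest : List String) (t n : Int) (p : String) :
    cutSticksLoopA (c :: rest) t n p =
      if c = "(" then cutSticksLoopA rest t (n + 1) c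
      else if c = ")" then cutSticksLoopA rest (if p = "(" then t + (n - 1) else t + 1) (n - 1) c
      else cutSticksLoopA rest t n c := rfl

theorem loopB_cons (c : String) (rest : List String) (t d : Int) :
    cutSticksLoopB (c :: rest) t d =
      if c = "(" ∧ rest.head? = some ")" then
        cutSticksLoopB rest.tail (t + d) d
      else if c = "(" then
        cutSticksLoopB rest t (d + 1)
      else if c = ")" then
        cutSticksLoopB rest (t + 1) (d - 1)
      else
        cutSticksLoopB rest t d := by
  rw [cutSticksLoopB]

-- Invariant: the loops agree provided the pending `pre` is not an unconsumed "(" facing a ")".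
theorem cutSticksLoop_eq : ∀ (l : List String) (t n : Int) (p : String),
    (p = "(" → l.head? ≠ some ")") → cutSticksLoopA l t n p = cutSticksLoopB l t n
  | [], t, n, p, _ => by simp [cutSticksLoopA, cutSticksLoopB]
  | c :: rest, t, n, p, h => by
    rw [loopA_cons, loopB_cons]
    by_cases hc : c = "("
    · subst hc
      rcases hr : rest with _ | ⟨c', rest2⟩
      · simp [cutSticksLoopA, cutSticksLoopB]
      · by_cases hc' : c' = ")"
        · subst hc'
          have IH := cutSticksLoop_eq rest2 (t + n) n ")" (by simp)
          simp only [List.head?_cons, List.tail_cons, if_true, true_and]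
          rw [loopA_cons]
          rw [if_neg (show ¬((")" : String) = "(") by decide)]
          rw [if_pos (rfl : (")" : String) = ")")]
          rw [if_pos (rfl : ("(" : String) = "(")]
          rw [show t + (n + 1 - 1) = t + n by ring, show n + 1 - 1 = n by ring]
          exact IH
        · have IH := cutSticksLoop_eq (c' :: rest2) t (n + 1) "(" (by simp [hc'])
          simp only [List.head?_cons, if_true, true_and]
          rw [if_neg (show ¬(some c' = some ")") from fun hx => hc' (Option.some.inj hx))]
          exact IH
    · by_cases hc2 : c = ")"
      · have hp : p ≠ "(" := fun hpp => (h hpp) (by rw [List.head?_cons, hc2])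
        have IH := cutSticksLoop_eq rest (t + 1) (n - 1) c (fun hcp => absurd hcp hc)
        rw [if_neg hc, if_pos hc2, if_neg hp]
        rw [if_neg (show ¬(c = "(" ∧ rest.head? = some ")") from fun hx => hc hx.1),
            if_neg hc, if_pos hc2]
        exact IH
      · have IH := cutSticksLoop_eq rest t n c (fun hcp => absurd hcp hc)
        rw [if_neg hc, if_neg hc2]
        rw [if_neg (show ¬(c = "(" ∧ rest.head? = some ")") from fun hx => hc hx.1),
            if_neg hc, if_neg hc2]
        exact IH
  termination_by l => l.length
  decreasing_by all_goals simp_all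

-- ===== VERDICT (by name: the statement is the Claim_ definition above) =====
theorem cut_sticks_spec : Claim_equal_cut_sticks := by
  intro chars _
  unfold Spec_cut_sticks cut_sticks cut_sticks_alt
  exact cutSticksLoop_eq chars 0 0 "" (by simp)
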